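-- pv_equiv track=rewrite | github.com/JacopoMaster/Advent_of_code_2024 | Day 09/day09.py | can_move_file_whole
-- ===== SOURCE A (Python) =====
-- def find_free_spans(disk):
--     free_spans = []
--     in_free = False
--     start_free = None
--     for i, ch in enumerate(disk):
--         if ch == '.' and not in_free:
--             in_free = True
--             start_free = i
--         elif ch != '.' and in_free:
--             free_spans.append((start_free, i - 1))
--             in_free = False
--     if in_free:
--         free_spans.append((start_free, len(disk) - 1))
--     return free_spans
--
-- def can_move_file_whole(disk, file_info):
--     # Look for a free span to the LEFT of file_info['start'] that can fit the entire file
--     length_needed = file_info['length']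
--     file_start = file_info['start']
--     free_spans = find_free_spans(disk)
--     left_spans = [span for span in free_spans if span[1] < file_start]
--     for (fs, fe) in left_spans:
--         span_len = fe - fs + 1
--         if span_len >= length_needed:
--             return (fs, fs + length_needed - 1)
--     return None
-- ===== SOURCE B (Python) =====
-- def can_move_file_whole(disk, file_info):
--     # Single left-to-right pass: track the current run of '.' cells and decide
--     # at the moment a run closes; no intermediate list of spans is built, and
--     # the scan stops as soon as a run ends at or past file_info['start'].
--     length_needed = file_info['length']
--     file_start = file_info['start']
--     run_start = None
--     for i, ch in enumerate(disk):
--         if ch == '.':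
--             if run_start is None:
--                 run_start = i
--         else:
--             if run_start is not None:
--                 if i - 1 >= file_start:
--                     return None  # every later free run ends even further right
--                 if i - run_start >= length_needed:
--                     return (run_start, run_start + length_needed - 1)
--                 run_start = None
--     if run_start is not None and len(disk) - 1 < file_start \
--             and len(disk) - run_start >= length_needed:
--         return (run_start, run_start + length_needed - 1)
--     return None
-- ===== Notes on version B (the rewrite author's own statement) =====
-- stated objective: alternative
-- what changed: B replaces A's three phases (collect all free spans, filter those left of the file, scan for the first fitting one) by a single left-to-right pass that decides as soon as a dot-run closes and stops early once a run ends at or past file_start; no span list is built.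
import Mathlib
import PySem

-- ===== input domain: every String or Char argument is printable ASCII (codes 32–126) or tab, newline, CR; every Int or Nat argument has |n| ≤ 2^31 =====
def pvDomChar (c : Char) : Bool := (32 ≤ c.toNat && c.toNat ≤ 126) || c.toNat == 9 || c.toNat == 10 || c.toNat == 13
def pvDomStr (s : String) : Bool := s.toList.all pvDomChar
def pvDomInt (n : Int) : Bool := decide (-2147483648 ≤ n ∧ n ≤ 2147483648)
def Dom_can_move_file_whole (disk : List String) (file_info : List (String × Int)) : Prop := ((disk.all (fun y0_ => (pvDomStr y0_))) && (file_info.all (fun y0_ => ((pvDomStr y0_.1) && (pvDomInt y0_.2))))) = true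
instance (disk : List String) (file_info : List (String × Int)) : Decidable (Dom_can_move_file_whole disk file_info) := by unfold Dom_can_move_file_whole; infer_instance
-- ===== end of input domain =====

-- B is a single left-to-right pass with an early stop instead of A's
-- collect-all-spans / filter / first-fit pipeline; same return value on Pre_.

-- ===== PORT A =====
-- file_info['k'] on the association list = first match
def pyLookup (l : List (String × Int)) (k : String) : Option Int :=
  (l.find? (fun p => p.1 == k)).map (·.2)
-- Python's for-loop over enumerate(disk) as structural recursion over the same
-- state (spans, in_free, start_free); i is the enumerate index. At the end of
-- the list i = len(disk), so the final append uses i - 1 = len(disk) - 1.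
def ffs_go (disk : List String) (i : Int) (spans : List (Int × Int))
    (in_free : Bool) (start_free : Option Int) : List (Int × Int) :=
  match disk with
  | [] => if in_free then spans ++ [(start_free.getD 0, i - 1)] else spans
  | ch :: rest =>
    if ch == "." && !in_free then
      ffs_go rest (i + 1) spans true (some i)
    else if ch != "." && in_free then
      ffs_go rest (i + 1) (spans ++ [(start_free.getD 0, i - 1)]) false start_free
    else
      ffs_go rest (i + 1) spans in_free start_free

def find_free_spans (disk : List String) : List (Int × Int) :=
  ffs_go disk 0 [] false none

-- the final for-loop over left_spans
def first_fit (spans : List (Int × Int)) (length_needed : Int) : Option (Int × Int) :=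
  match spans with
  | [] => none
  | (fs, fe) :: rest =>
    if fe - fs + 1 ≥ length_needed then some (fs, fs + length_needed - 1)
    else first_fit rest length_needed

def can_move_file_whole (disk : List String) (file_info : List (String × Int)) : Option (Int × Int) :=
  match pyLookup file_info "length", pyLookup file_info "start" with
  | some length_needed, some file_start =>
    let free_spans := find_free_spans disk
    let left_spans := free_spans.filter (fun sp => sp.2 < file_start)
    first_fit left_spans length_needed
  | _, _ => none  -- KeyError in Python; excluded by Pre_

-- ===== PORT B =====
-- B's own dict access, first match
def pyLookup_alt (l : List (String × Int)) (k : String) : Option Int :=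
  (l.find? (fun p => p.1 == k)).map (·.2)
-- Source B's single pass: run_start tracks the current '.' run; a run closing at
-- i - 1 ≥ file_start ends the scan with None.
def scan_go (disk : List String) (i : Int) (run_start : Option Int)
    (length_needed file_start : Int) : Option (Int × Int) :=
  match disk, run_start with
  | [], some s =>
    if i - 1 < file_start && i - s ≥ length_needed then
      some (s, s + length_needed - 1)
    else none
  | [], none => none
  | ch :: rest, some s =>
    if ch == "." then
      scan_go rest (i + 1) (some s) length_needed file_start
    else if i - 1 ≥ file_start then none
    else if i - s ≥ length_needed then some (s, s + length_needed - 1)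
    else scan_go rest (i + 1) none length_needed file_start
  | ch :: rest, none =>
    if ch == "." then
      scan_go rest (i + 1) (some i) length_needed file_start
    else
      scan_go rest (i + 1) none length_needed file_start

def can_move_file_whole_alt (disk : List String) (file_info : List (String × Int)) : Option (Int × Int) :=
  match pyLookup_alt file_info "length" with
  | none => none  -- KeyError in Python; excluded by Pre_
  | some length_needed =>
    match pyLookup_alt file_info "start" with
    | none => none  -- KeyError in Python; excluded by Pre_
    | some file_start => scan_go disk 0 none length_needed file_start

-- ===== PRECONDITION & SPEC =====
-- A raises KeyError unless file_info has both keys 'length' and 'start'.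
def Pre_can_move_file_whole (disk : List String) (file_info : List (String × Int)) : Prop :=
  (file_info.find? (fun p => p.1 == "length")).isSome ∧ (file_info.find? (fun p => p.1 == "start")).isSome
instance (disk : List String) (file_info : List (String × Int)) : Decidable (Pre_can_move_file_whole disk file_info) := by unfold Pre_can_move_file_whole; infer_instance

def pvWitness_can_move_file_whole : List String × (List (String × Int)) :=
  (["0", ".", ".", "1"], [("length", 1), ("start", 3)])

def Spec_can_move_file_whole (disk : List String) (file_info : List (String × Int)) (out : Option (Int × Int)) : Prop := out = can_move_file_whole_alt disk file_info
instance (disk : List String) (file_info : List (String × Int)) (out : Option (Int × Int)) : Decidable (Spec_can_move_file_whole disk file_info out) := by unfold Spec_can_move_file_whole; infer_instance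

-- ===== CLAIM (what is proved, stated in full; the proofs are below) =====
def Claim_equal_can_move_file_whole : Prop := ∀ (disk : List String) (file_info : List (String × Int)), Dom_can_move_file_whole disk file_info → Pre_can_move_file_whole disk file_info → Spec_can_move_file_whole disk file_info (can_move_file_whole disk file_info)

-- ===== LEMMAS AND PROOFS =====

-- accumulator of ffs_go factors out
theorem ffs_go_append (disk : List String) (i : Int) (spans : List (Int × Int))
    (in_free : Bool) (st : Option Int) :
    ffs_go disk i spans in_free st = spans ++ ffs_go disk i [] in_free st := by
  induction disk generalizing i spans in_free st with
  | nil => simp [ffs_go]; split <;> simp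
  | cons ch rest ih =>
    simp only [ffs_go, List.nil_append]
    split
    · rw [ih]
    · split
      · rw [ih]; rw [ih (i + 1) [(st.getD 0, i - 1)]]; simp
      · rw [ih]

-- every span produced from index i on ends at ≥ i - 1
theorem ffs_go_end_ge (disk : List String) (i : Int) (in_free : Bool) (st : Option Int)
    (sp : Int × Int) (h : sp ∈ ffs_go disk i [] in_free st) : i - 1 ≤ sp.2 := by
  induction disk generalizing i in_free st with
  | nil =>
    simp [ffs_go] at h
    obtain ⟨-, rfl⟩ := h
    simp
  | cons ch rest ih =>
    simp only [ffs_go] at h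
    split at h
    · have := ih _ _ _ h; omega
    · split at h
      · rw [ffs_go_append] at h
        simp at h
        rcases h with h | h
        · simp [h]
        · have := ih _ _ _ h; omega
      · have := ih _ _ _ h; omega

theorem filter_none (fstart : Int) (l : List (Int × Int))
    (h : ∀ sp ∈ l, ¬ sp.2 < fstart) :
    l.filter (fun sp => sp.2 < fstart) = [] := by
  simp [List.filter_eq_nil_iff]
  intro a b hab
  have := h (a, b) hab
  simp at this
  omega

-- main invariant: B's scan equals A's first-fit over the filtered remaining spans
theorem scan_go_eq (disk : List String) (i : Int) (run_start : Option Int)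
    (needed fstart : Int) (st : Option Int)
    (hst : ∀ s, run_start = some s → st.getD 0 = s) :
    scan_go disk i run_start needed fstart =
      first_fit ((ffs_go disk i [] run_start.isSome st).filter (fun sp => sp.2 < fstart)) needed := by
  induction disk generalizing i run_start st with
  | nil =>
    cases run_start with
    | none => simp [scan_go, ffs_go, first_fit]
    | some s =>
      have hs := hst s rfl
      simp [scan_go, ffs_go, hs, List.filter]
      by_cases h1 : i ≤ fstart
      · simp only [h1, decide_true, first_fit]
        by_cases h2 : needed ≤ i - s
        · simp [h2, show needed ≤ i - 1 - s + 1 by omega]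
        · simp [h2, show ¬ needed ≤ i - 1 - s + 1 by omega]
      · simp [h1, first_fit]
  | cons ch rest ih =>
    cases run_start with
    | none =>
      by_cases hdot : ch = "."
      · subst hdot
        simp only [scan_go, ffs_go, Option.isSome_none, Bool.not_false, beq_self_eq_true,
          Bool.and_self, if_true]
        exact ih (i + 1) (some i) (some i) (by intro s hs; cases hs; rfl)
      · have hne : (ch == ".") = false := by simp [hdot]
        simp only [scan_go, ffs_go, Option.isSome_none, hne, Bool.false_and, Bool.and_false,
          Bool.false_eq_true, if_false]
        exact ih (i + 1) none st (by intro s hs; cases hs)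
    | some s =>
      have hs := hst s rfl
      by_cases hdot : ch = "."
      · subst hdot
        simp only [scan_go, ffs_go, Option.isSome_some, beq_self_eq_true, if_true,
          Bool.not_true, Bool.and_false, bne_self_eq_false, Bool.false_and,
          Bool.false_eq_true, if_false]
        exact ih (i + 1) (some s) st hst
      · have hne : (ch == ".") = false := by simp [hdot]
        have hbne : (ch != ".") = true := by simp [bne, hne]
        simp only [scan_go, ffs_go, Option.isSome_some, hne, hbne, Bool.and_true,
          Bool.false_and, Bool.false_eq_true, if_false, if_true, List.nil_append, hs]
        rw [ffs_go_append]
        simp only [List.singleton_append, List.filter]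
        by_cases h1 : i - 1 ≥ fstart
        · rw [if_pos h1, decide_eq_false (by omega : ¬ (i - 1 < fstart))]
          have hall : List.filter (fun sp => decide (sp.2 < fstart)) (ffs_go rest (i + 1) [] false st) = [] := by
            apply filter_none
            intro sp hsp
            have := ffs_go_end_ge rest (i + 1) false st sp hsp
            simp
            omega
          rw [hall]
          rfl
        · rw [if_neg h1, decide_eq_true (by omega : i - 1 < fstart)]
          simp only [first_fit]
          by_cases h2 : i - s ≥ needed
          · rw [if_pos h2, if_pos (by omega : i - 1 - s + 1 ≥ needed)]
          · rw [if_neg h2, if_neg (by omega : ¬ i - 1 - s + 1 ≥ needed)]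
            exact ih (i + 1) none st (by intro s hs; cases hs)

theorem pyLookup_eq (l : List (String × Int)) (k : String) :
    pyLookup l k = pyLookup_alt l k := rfl

-- ===== VERDICT (by name: the statement is the Claim_ definition above) =====
theorem can_move_file_whole_spec : Claim_equal_can_move_file_whole := by
  intro disk file_info _ hpre
  unfold Spec_can_move_file_whole can_move_file_whole can_move_file_whole_alt
  obtain ⟨h1, h2⟩ := hpre
  rw [pyLookup_eq, pyLookup_eq]
  cases hl : pyLookup_alt file_info "length" with
  | none =>
    have : (file_info.find? (fun p => p.1 == "length")) = none := by
      simpa [pyLookup_alt] using hl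
    rw [this] at h1
  | some needed =>
    cases hs : pyLookup_alt file_info "start" with
    | none =>
      have : (file_info.find? (fun p => p.1 == "start")) = none := by
        simpa [pyLookup_alt] using hs
      rw [this] at h2
    | some fstart =>
      simp only
      rw [scan_go_eq disk 0 none needed fstart none (by intro s hs; cases hs)]
      rfl
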